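-- pv_equiv track=rewrite | github.com/Pitzanami/InvestigacionEJ2025 | LSM_tools.py | shapeToCoords
-- ===== SOURCE A (Python) =====
-- def shapeToCoords(shape):
--     l = []
--
--     X, Y, Z = shape
--     n = X*Y*Z
--
--     for i in range(n):
--         x = i // (Y*Z)
--         y = (i % (Y*Z))//Z
--         z = i % Z
--         l.append((x,y,z))
--
--     return l
-- ===== SOURCE B (Python) =====
-- def shapeToCoords(shape):
--     X, Y, Z = shape
--     if X <= 0 or Y <= 0 or Z <= 0:
--         return []
--     l = []
--     for x in range(X):
--         for y in range(Y):
--             for z in range(Z):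
--                 l.append((x, y, z))
--     return l
-- ===== Notes on version B (the rewrite author's own statement) =====
-- stated objective: simpler
-- what changed: Replaces the flat counter over range(X*Y*Z) and its integer-division/modulo decoding of each index by three plain nested loops over range(X), range(Y), range(Z) (with an empty-grid short-circuit), producing the same row-major order with no arithmetic.
-- intended difference: On shapes with exactly two negative dimensions (so X*Y*Z > 0, e.g. (-1,-1,1)) A returns X*Y*Z meaningless floor-division tuples such as [(0,0,0)], an artefact of Python's floored division on negatives; B returns [], the intended result for a non-positive grid dimension. — e.g. on shapeToCoords(-1, -1, 1): A returns [(0, 0, 0)], B returns []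
import Mathlib
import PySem

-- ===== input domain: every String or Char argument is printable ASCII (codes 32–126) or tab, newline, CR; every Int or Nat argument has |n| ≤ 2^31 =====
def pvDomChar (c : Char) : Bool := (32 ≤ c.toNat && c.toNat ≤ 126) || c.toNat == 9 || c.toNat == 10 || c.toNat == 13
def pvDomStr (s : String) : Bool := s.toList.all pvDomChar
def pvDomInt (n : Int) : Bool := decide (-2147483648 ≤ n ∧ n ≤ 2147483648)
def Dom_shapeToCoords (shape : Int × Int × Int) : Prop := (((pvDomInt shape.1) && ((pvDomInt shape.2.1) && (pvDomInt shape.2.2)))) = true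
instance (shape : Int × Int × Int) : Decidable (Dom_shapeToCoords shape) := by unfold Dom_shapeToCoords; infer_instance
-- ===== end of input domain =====

-- B replaces the flat counter + //,% index decoding with three nested loops (simpler; same row-major order).

-- ===== PORT A =====
-- for i in range(X*Y*Z): l.append((i//(Y*Z), (i%(Y*Z))//Z, i%Z))
def shapeToCoords (shape : Int × Int × Int) : List (Int × Int × Int) :=
  let X := shape.1; let Y := shape.2.1; let Z := shape.2.2
  let n := X * Y * Z
  (PySem.List.pyRange 0 n 1).foldl
    (fun l i =>
      l ++ [(PySem.Int.floordiv i (Y * Z),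
             PySem.Int.floordiv (PySem.Int.mod i (Y * Z)) Z,
             PySem.Int.mod i Z)]) []

-- ===== PORT B =====
-- empty-dimension short-circuit, then: for x in range(X): for y in range(Y): for z in range(Z): l.append((x,y,z))
def shapeToCoords_alt (shape : Int × Int × Int) : List (Int × Int × Int) :=
  let X := shape.1; let Y := shape.2.1; let Z := shape.2.2
  if X ≤ 0 ∨ Y ≤ 0 ∨ Z ≤ 0 then [] else
  (PySem.List.pyRange 0 X 1).foldl
    (fun l x =>
      (PySem.List.pyRange 0 Y 1).foldl
        (fun l y =>
          (PySem.List.pyRange 0 Z 1).foldl (fun l z => l ++ [(x, y, z)]) l) l) []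

-- ===== PRECONDITION & SPEC =====
-- On shapes with exactly two negative dimensions (so X*Y*Z > 0, e.g. (-1,-1,1)) A returns X*Y*Z
-- meaningless floor-division tuples such as [(0,0,0)], an artefact of Python's floored division on
-- negatives; B returns [], the intended result for a non-positive grid dimension.
def D_shapeToCoords (shape : Int × Int × Int) : Prop :=
  (shape.1 < 0 ∨ shape.2.1 < 0 ∨ shape.2.2 < 0) ∧ 0 < shape.1 * shape.2.1 * shape.2.2
instance (shape : Int × Int × Int) : Decidable (D_shapeToCoords shape) := by
  unfold D_shapeToCoords; infer_instance

def Spec_shapeToCoords (shape : Int × Int × Int) (out : List (Int × Int × Int)) : Prop :=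
  ¬ D_shapeToCoords shape → out = shapeToCoords_alt shape
instance (shape : Int × Int × Int) (out : List (Int × Int × Int)) : Decidable (Spec_shapeToCoords shape out) := by
  unfold Spec_shapeToCoords; infer_instance

def pvDiffWitness_shapeToCoords : (Int × Int × Int) := (-1, -1, 1)
def pvDiffWitnessOut_shapeToCoords : (List (Int × Int × Int)) × (List (Int × Int × Int)) :=
  ([(0, 0, 0)], [])

-- ===== CLAIM (what is proved, stated in full; the proofs are below) =====
def Claim_unchanged_shapeToCoords : Prop :=
  ∀ (shape : Int × Int × Int), Dom_shapeToCoords shape → Spec_shapeToCoords shape (shapeToCoords shape)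
def Claim_changed_shapeToCoords : Prop :=
  Dom_shapeToCoords (pvDiffWitness_shapeToCoords) ∧ D_shapeToCoords (pvDiffWitness_shapeToCoords) ∧
  shapeToCoords (pvDiffWitness_shapeToCoords) = pvDiffWitnessOut_shapeToCoords.1 ∧
  shapeToCoords_alt (pvDiffWitness_shapeToCoords) = pvDiffWitnessOut_shapeToCoords.2 ∧
  pvDiffWitnessOut_shapeToCoords.1 ≠ pvDiffWitnessOut_shapeToCoords.2
def Claim_exact_shapeToCoords : Prop :=
  ∀ (shape : Int × Int × Int), Dom_shapeToCoords shape → D_shapeToCoords shape →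
    shapeToCoords shape ≠ shapeToCoords_alt shape

-- ===== LEMMAS AND PROOFS =====

-- Closed form of port A: map the index-decoding over the range.
theorem shapeToCoords_eq_map (X Y Z : Int) :
    shapeToCoords (X, Y, Z) =
      (PySem.List.pyRange 0 (X * Y * Z) 1).map
        (fun i => (PySem.Int.floordiv i (Y * Z),
                   PySem.Int.floordiv (PySem.Int.mod i (Y * Z)) Z,
                   PySem.Int.mod i Z)) := by
  simp only [shapeToCoords]
  rw [PySem.List.foldl_append_singleton_eq_map, List.nil_append]

-- Closed form of port B: a triple flatMap.
theorem shapeToCoords_alt_eq_flatMap (X Y Z : Int) :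
    shapeToCoords_alt (X, Y, Z) =
      (PySem.List.pyRange 0 X 1).flatMap (fun x =>
        (PySem.List.pyRange 0 Y 1).flatMap (fun y =>
          (PySem.List.pyRange 0 Z 1).map (fun z => (x, y, z)))) := by
  simp only [shapeToCoords_alt]
  split_ifs with hg
  · symm
    rcases hg with h | h | h
    · rw [PySem.List.pyRange_one_eq_nil (a := 0) (b := X) h]; simp
    · rw [PySem.List.pyRange_one_eq_nil (a := 0) (b := Y) h]; simp
    · rw [PySem.List.pyRange_one_eq_nil (a := 0) (b := Z) h]; simp
  rw [show (fun (l : List (Int × Int × Int)) (x : Int) =>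
        (PySem.List.pyRange 0 Y 1).foldl
          (fun l y => (PySem.List.pyRange 0 Z 1).foldl (fun l z => l ++ [(x, y, z)]) l) l)
      = (fun l x => l ++ (PySem.List.pyRange 0 Y 1).flatMap (fun y =>
          (PySem.List.pyRange 0 Z 1).map (fun z => (x, y, z)))) from ?_]
  · exact PySem.List.foldl_append_eq_flatMap _ _ _
  · funext l x
    rw [show (fun (l : List (Int × Int × Int)) (y : Int) =>
          (PySem.List.pyRange 0 Z 1).foldl (fun l z => l ++ [(x, y, z)]) l)
        = (fun l y => l ++ (PySem.List.pyRange 0 Z 1).map (fun z => (x, y, z))) from ?_]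
    · exact PySem.List.foldl_append_eq_flatMap _ _ _
    · funext l y
      exact PySem.List.foldl_append_singleton_eq_map _ _ _

-- The pure-Nat core, inner layer: decoding range (Y*Z) by /,% equals the nested enumeration.
theorem pair_decode (Y Z : Nat) :
    (List.range (Y * Z)).map (fun j => (j / Z, j % Z)) =
      (List.range Y).flatMap (fun y => (List.range Z).map fun z => (y, z)) := by
  induction Y with
  | zero => simp
  | succ Y ih =>
    rcases Nat.eq_zero_or_pos Z with hZ | hZ
    · simp [hZ]
    · rw [Nat.succ_mul, List.range_add, List.map_append, ih, List.range_add,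
        List.flatMap_append, List.map_map]
      congr 1
      have h : ∀ j ∈ List.range Z,
          ((fun j => (j / Z, j % Z)) ∘ (fun x => Y * Z + x)) j = (fun z => ((Y : Nat), z)) j := by
        intro j hj
        rw [List.mem_range] at hj
        have h1 : (Y * Z + j) / Z = Y := by
          rw [Nat.add_comm, Nat.add_mul_div_right _ _ hZ, Nat.div_eq_of_lt hj, Nat.zero_add]
        have h2 : (Y * Z + j) % Z = j := by
          rw [Nat.add_comm, Nat.add_mul_mod_self_right, Nat.mod_eq_of_lt hj]
        simp [h1, h2]
      rw [List.map_congr_left h]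
      simp

-- The pure-Nat core, outer layer.
theorem triple_decode (X Y Z : Nat) :
    (List.range (X * (Y * Z))).map
        (fun i => (i / (Y * Z), i % (Y * Z) / Z, i % (Y * Z) % Z)) =
      (List.range X).flatMap (fun x =>
        (List.range Y).flatMap (fun y => (List.range Z).map fun z => (x, y, z))) := by
  induction X with
  | zero => simp
  | succ X ih =>
    rcases Nat.eq_zero_or_pos (Y * Z) with hYZ | hYZ
    · rcases Nat.mul_eq_zero.mp hYZ with h | h <;> simp [h]
    · rw [Nat.succ_mul, List.range_add, List.map_append, ih, List.range_add,
        List.flatMap_append, List.map_map]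
      congr 1
      have h : ∀ j ∈ List.range (Y * Z),
          ((fun i => (i / (Y * Z), i % (Y * Z) / Z, i % (Y * Z) % Z)) ∘ (fun x => X * (Y * Z) + x)) j
            = (fun j => ((X : Nat), j / Z, j % Z)) j := by
        intro j hj
        rw [List.mem_range] at hj
        have h1 : (X * (Y * Z) + j) / (Y * Z) = X := by
          rw [Nat.add_comm, Nat.add_mul_div_right _ _ hYZ, Nat.div_eq_of_lt hj, Nat.zero_add]
        have h2 : (X * (Y * Z) + j) % (Y * Z) = j := by
          rw [Nat.add_comm, Nat.add_mul_mod_self_right, Nat.mod_eq_of_lt hj]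
        have h3 : (X * (Y * Z) + j) % Z = j % Z := by
          rw [Nat.add_comm, ← Nat.mul_assoc, Nat.add_mul_mod_self_right]
        simp [h1, h2, h3]
      rw [List.map_congr_left h]
      have := congrArg (List.map (fun p : Nat × Nat => ((X : Nat), p.1, p.2))) (pair_decode Y Z)
      simpa [List.map_flatMap, List.map_map, Function.comp] using this

-- mod-of-mod: (i % (Y*Z)) % Z = i % Z for naturals, aligning A's third component.
theorem mod_mod_mul (i Y Z : Nat) : i % (Y * Z) % Z = i % Z :=
  Nat.mod_mod_of_dvd i (dvd_mul_left Z Y)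

-- pyRange 0 n 1 as a mapped Nat range.
theorem pyRange_zero_cast (n : Int) :
    PySem.List.pyRange 0 n 1 = (List.range n.toNat).map (fun k : Nat => (k : Int)) := by
  rw [PySem.List.pyRange_one, Int.sub_zero]
  exact List.map_congr_left (fun k _ => by simp)

-- Pushing the Nat-level identity through the casts.
theorem cast_flatMap (a b c : Nat) :
    ((List.range a).map (fun k : Nat => (k : Int))).flatMap (fun x =>
      ((List.range b).map (fun k : Nat => (k : Int))).flatMap (fun y =>
        ((List.range c).map (fun k : Nat => (k : Int))).map (fun z => (x, y, z))))
    = ((List.range a).flatMap (fun x =>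
        (List.range b).flatMap (fun y => (List.range c).map (fun z => (x, y, z))))).map
          (fun p : Nat × Nat × Nat => ((p.1 : Int), (p.2.1 : Int), (p.2.2 : Int))) := by
  simp [List.map_flatMap, List.flatMap_map, List.map_map]
  rfl

-- Main agreement on all-nonnegative shapes.
theorem agree_nonneg (X Y Z : Int) (hX : 0 ≤ X) (hY : 0 ≤ Y) (hZ : 0 ≤ Z) :
    shapeToCoords (X, Y, Z) = shapeToCoords_alt (X, Y, Z) := by
  rw [shapeToCoords_eq_map, shapeToCoords_alt_eq_flatMap]
  obtain ⟨a, rfl⟩ := Int.eq_ofNat_of_zero_le hX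
  obtain ⟨b, rfl⟩ := Int.eq_ofNat_of_zero_le hY
  obtain ⟨c, rfl⟩ := Int.eq_ofNat_of_zero_le hZ
  rw [pyRange_zero_cast, pyRange_zero_cast, pyRange_zero_cast, pyRange_zero_cast, cast_flatMap]
  have hn : ((a : Int) * b * c).toNat = a * (b * c) := by
    rw [mul_assoc, ← Nat.cast_mul, ← Nat.cast_mul, Int.toNat_natCast]
  rw [hn, List.map_map, ← triple_decode, List.map_map]
  apply List.map_congr_left
  intro i hi
  rw [List.mem_range] at hi
  have e2 : PySem.Int.mod (i : Int) ((b : Int) * c) = ((i % (b * c) : Nat) : Int) := by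
    rw [← Nat.cast_mul]
    exact PySem.Int.mod_natCast i (b * c)
  have e1 : PySem.Int.floordiv (i : Int) ((b : Int) * c) = ((i / (b * c) : Nat) : Int) := by
    rw [← Nat.cast_mul]
    exact PySem.Int.floordiv_natCast i (b * c)
  simp only [Function.comp, e1, e2, PySem.Int.floordiv_natCast, PySem.Int.mod_natCast,
    mod_mod_mul]
  simp

-- B is empty as soon as one loop bound is ≤ 0.
theorem alt_empty_of_nonpos (X Y Z : Int) (h : X ≤ 0 ∨ Y ≤ 0 ∨ Z ≤ 0) :
    shapeToCoords_alt (X, Y, Z) = [] := by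
  rw [shapeToCoords_alt_eq_flatMap]
  rcases h with h | h | h
  · rw [PySem.List.pyRange_one_eq_nil (a := 0) (b := X) h]; simp
  · rw [PySem.List.pyRange_one_eq_nil (a := 0) (b := Y) h]; simp
  · rw [PySem.List.pyRange_one_eq_nil (a := 0) (b := Z) h]; simp

-- A is empty when n ≤ 0.
theorem a_empty_of_nonpos (X Y Z : Int) (h : X * Y * Z ≤ 0) :
    shapeToCoords (X, Y, Z) = [] := by
  rw [shapeToCoords_eq_map, PySem.List.pyRange_one_eq_nil h]
  rfl

-- A is nonempty when n > 0.
theorem a_ne_nil_of_pos (X Y Z : Int) (h : 0 < X * Y * Z) :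
    shapeToCoords (X, Y, Z) ≠ [] := by
  rw [shapeToCoords_eq_map, PySem.List.pyRange_one_cons (by omega)]
  simp

-- ===== VERDICT (by name: the statement is the Claim_ definition above) =====
theorem shapeToCoords_spec : Claim_unchanged_shapeToCoords := by
  rintro ⟨X, Y, Z⟩ _
  intro hnD
  have hD : ¬ ((X < 0 ∨ Y < 0 ∨ Z < 0) ∧ 0 < X * Y * Z) := hnD
  show shapeToCoords (X, Y, Z) = shapeToCoords_alt (X, Y, Z)
  by_cases hneg : X < 0 ∨ Y < 0 ∨ Z < 0
  · have hn : X * Y * Z ≤ 0 := by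
      by_contra hpos
      exact hD ⟨hneg, by omega⟩
    rw [a_empty_of_nonpos X Y Z hn, alt_empty_of_nonpos X Y Z (by omega)]
  · push_neg at hneg
    exact agree_nonneg X Y Z (by omega) (by omega) (by omega)

theorem shapeToCoords_changed : Claim_changed_shapeToCoords := by
  unfold Claim_changed_shapeToCoords; decide

theorem shapeToCoords_tight : Claim_exact_shapeToCoords := by
  rintro ⟨X, Y, Z⟩ _ ⟨hneg, hpos⟩
  simp only at hneg hpos
  have hB : shapeToCoords_alt (X, Y, Z) = [] := by
    apply alt_empty_of_nonpos
    rcases hneg with h | h | h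
    · exact Or.inl (by omega)
    · exact Or.inr (Or.inl (by omega))
    · exact Or.inr (Or.inr (by omega))
  rw [hB]
  exact a_ne_nil_of_pos X Y Z hpos
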